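-- pv_equiv track=rewrite | github.com/ChrisWise07/zeit3120_pfs | assignment_1/ciphers/vigenere.py | restore_punctuation_to_string
-- ===== SOURCE A (Python) =====
-- from typing import Dict, List, Tuple
--
-- def restore_punctuation_to_string(
--     original_string: str, modified_string: List[str]
-- ) -> str:
--     """
--     Restore the punctuation to the original string.
--
--     Args:
--         original_encrypted_string (str): The original encrypted string.
--         decrypted_string (List[str]): The decrypted string.
--
--     Returns:
--         str: The decrypted string with punctuation restored.
--     """
--     original_string = original_string.split()
--     restored_string = ""
--
--     for word in original_string:
--         for char in word:
--             if char.isalpha():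
--                 if char.isupper():
--                     restored_string += modified_string.pop(0).upper()
--                 else:
--                     restored_string += modified_string.pop(0)
--             else:
--                 restored_string += char
--         restored_string += " "
--
--     return restored_string.rstrip()
-- ===== SOURCE B (Python) =====
-- def restore_punctuation_to_string(
--     original_string: str, modified_string: list
-- ) -> str:
--     # Positional patching: compute the alpha positions of the normalized
--     # template, splice the needed replacements off modified_string in one bulk
--     # slice, and assign them into the template's character list by index.
--     # (Consumes the same prefix of modified_string as the original.)
--     chars = list(" ".join(original_string.split()))
--     positions = [i for i, c in enumerate(chars) if c.isalpha()]
--     taken = modified_string[: len(positions)]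
--     del modified_string[: len(positions)]
--     for i, r in zip(positions, taken):
--         chars[i] = r.upper() if chars[i].isupper() else r
--     return "".join(chars).rstrip()
-- ===== Notes on version B (the rewrite author's own statement) =====
-- stated objective: faster
-- what changed: A walks word-by-word and char-by-char, popping one replacement per alphabetic char (pop(0) shifts the whole list each time); B instead precomputes the alpha positions of the whitespace-normalized template, splices the needed replacements off modified_string in one bulk slice, and patches them into the template's character list by index assignment.
import Mathlib
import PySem

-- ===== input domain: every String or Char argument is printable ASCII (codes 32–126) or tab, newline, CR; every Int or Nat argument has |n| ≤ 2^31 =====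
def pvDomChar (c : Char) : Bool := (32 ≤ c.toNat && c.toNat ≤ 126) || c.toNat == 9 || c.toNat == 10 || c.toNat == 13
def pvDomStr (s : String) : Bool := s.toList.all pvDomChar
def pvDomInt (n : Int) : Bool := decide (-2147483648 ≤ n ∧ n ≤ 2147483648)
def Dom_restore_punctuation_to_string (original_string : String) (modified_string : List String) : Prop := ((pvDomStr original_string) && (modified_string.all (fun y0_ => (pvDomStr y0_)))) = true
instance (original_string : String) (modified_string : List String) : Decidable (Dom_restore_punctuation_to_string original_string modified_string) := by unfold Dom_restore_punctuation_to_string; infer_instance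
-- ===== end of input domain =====

-- B replaces A's per-character pop(0) walk by positional patching: it computes the alpha
-- positions of the normalized template, slices the replacements off in one bulk splice and
-- assigns them by index (avoiding the quadratic pop(0) shifting). Return values agree on Pre_;
-- both consume the same prefix of modified_string (the mutation itself is outside the proved equivalence).

-- ===== PORT A =====
-- one character step of A's inner loop; the [] branches are where Python raises IndexError (outside Pre_)
def pvStepA (st : List Char × List String) (ch : Char) : List Char × List String :=
  if PySem.Chars.isalpha ch then
    if PySem.Chars.isupper ch then
      match st.2 with
      | [] => st
      | x :: rest => (st.1 ++ (PySem.Str.upper x).toList, rest)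
    else
      match st.2 with
      | [] => st
      | x :: rest => (st.1 ++ x.toList, rest)
  else (st.1 ++ [ch], st.2)

def restore_punctuation_to_string (original_string : String) (modified_string : List String) : String :=
  let words := PySem.Str.split₀ original_string
  let st := words.foldl
    (fun st word => ((word.toList.foldl pvStepA st).1 ++ [' '], (word.toList.foldl pvStepA st).2))
    ([], modified_string)
  String.mk (PySem.Chars.rstrip st.1)

-- ===== PORT B =====
-- Python str.isupper, ported by hand (exact: at least one cased char and no lowercase cased
-- char; cased = ASCII letter here, which is exact on the printable-ASCII domain)
def pvStrIsupper (cs : List Char) : Bool :=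
  cs.any PySem.Chars.isupper && cs.all (fun c => !PySem.Chars.islower c)

-- one assignment 'chars[i] = r.upper() if chars[i].isupper() else r' (i from enumerate, so i ≥ 0)
def pvPatch (cells : List (List Char)) (pr : Int × String) : List (List Char) :=
  if pvStrIsupper (cells.getD pr.1.toNat []) then
    cells.set pr.1.toNat (PySem.Str.upper pr.2).toList
  else
    cells.set pr.1.toNat pr.2.toList

def restore_punctuation_to_string_alt (original_string : String) (modified_string : List String) : String :=
  let chars := PySem.Chars.join [' '] ((PySem.Str.split₀ original_string).map String.toList)
  let positions := (PySem.List.enumerate chars).filterMap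
    (fun ic => if PySem.Chars.isalpha ic.2 then some ic.1 else none)
  let taken := modified_string.take positions.length   -- modified_string[:k] with k = len(positions) ≥ 0
  let cells := (positions.zip taken).foldl pvPatch (chars.map (fun c => [c]))
  String.mk (PySem.Chars.rstrip cells.flatten)

-- ===== PRECONDITION & SPEC =====
-- Pre_: Python A pops once per alphabetic character of the split words and raises IndexError
-- when modified_string runs out; Pre_ excludes exactly those raising inputs.
def Pre_restore_punctuation_to_string (original_string : String) (modified_string : List String) : Prop :=
  ((PySem.Str.split₀ original_string).flatMap String.toList).countP
    (fun c => PySem.Chars.isalpha c) ≤ modified_string.length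

instance (original_string : String) (modified_string : List String) : Decidable (Pre_restore_punctuation_to_string original_string modified_string) := by unfold Pre_restore_punctuation_to_string; infer_instance

def pvWitness_restore_punctuation_to_string : String × List String :=
  ("Hi, there!", ["a", "b", "c", "d", "e", "f", "g"])

def Spec_restore_punctuation_to_string (original_string : String) (modified_string : List String) (out : String) : Prop := out = restore_punctuation_to_string_alt original_string modified_string
instance (original_string : String) (modified_string : List String) (out : String) : Decidable (Spec_restore_punctuation_to_string original_string modified_string out) := by unfold Spec_restore_punctuation_to_string; infer_instance

-- ===== CLAIM (what is proved, stated in full; the proofs are below) =====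
def Claim_equal_restore_punctuation_to_string : Prop := ∀ (original_string : String) (modified_string : List String), Dom_restore_punctuation_to_string original_string modified_string → Pre_restore_punctuation_to_string original_string modified_string → Spec_restore_punctuation_to_string original_string modified_string (restore_punctuation_to_string original_string modified_string)

-- ===== LEMMAS AND PROOFS =====

-- the common value both programs compute: merge replacements into the template chars
def pvMerge : List Char → List String → List Char
  | [], _ => []
  | c :: cs, ms =>
    if PySem.Chars.isalpha c then
      match ms with
      | [] => []
      | x :: rest =>
          (if PySem.Chars.isupper c then (PySem.Str.upper x).toList else x.toList) ++ pvMerge cs rest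
    else c :: pvMerge cs ms

theorem pvCountAlpha_join (ws : List String) :
    (PySem.Chars.join [' '] (ws.map String.toList)).countP (fun c => PySem.Chars.isalpha c)
      = (ws.flatMap String.toList).countP (fun c => PySem.Chars.isalpha c) := by
  induction ws with
  | nil => simp [PySem.Chars.join, List.intercalate]
  | cons w ws ih =>
    cases ws with
    | nil => simp [PySem.Chars.join, List.intercalate]
    | cons w' ws' =>
      have hj := PySem.Chars.join_cons_cons [' '] w.toList w'.toList (ws'.map String.toList)
      simp only [List.map_cons] at hj ih ⊢
      rw [hj, List.countP_append, List.countP_append, ih]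
      simp [List.countP_cons, show PySem.Chars.isalpha ' ' = false from rfl, List.countP_append]

theorem pvFoldA_merge (cs : List Char) (acc : List Char) (ms : List String)
    (h : cs.countP (fun c => PySem.Chars.isalpha c) ≤ ms.length) :
    cs.foldl pvStepA (acc, ms)
      = (acc ++ pvMerge cs ms, ms.drop (cs.countP (fun c => PySem.Chars.isalpha c))) := by
  induction cs generalizing acc ms with
  | nil => simp [pvMerge]
  | cons c cs ih =>
    by_cases ha : PySem.Chars.isalpha c = true
    · cases ms with
      | nil => simp [List.countP_cons, ha] at h
      | cons x rest =>
        have h' : cs.countP (fun c => PySem.Chars.isalpha c) ≤ rest.length := by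
          simp [List.countP_cons, ha] at h; omega
        by_cases hu : PySem.Chars.isupper c = true <;>
          simp [pvStepA, pvMerge, ha, hu, List.countP_cons, ih _ _ h']
    · simp [pvStepA, pvMerge, ha, List.countP_cons, ih _ _ (by simpa [List.countP_cons, ha] using h)]

theorem pvStepA_space (st : List Char × List String) :
    pvStepA st ' ' = (st.1 ++ [' '], st.2) := by
  unfold pvStepA
  simp [show PySem.Chars.isalpha ' ' = false from rfl]

theorem pvFold_words (ws : List String) (st : List Char × List String) (h : ws ≠ []) :
    ws.foldl
      (fun st word => ((word.toList.foldl pvStepA st).1 ++ [' '], (word.toList.foldl pvStepA st).2))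
      st
    = (((PySem.Chars.join [' '] (ws.map String.toList)).foldl pvStepA st).1 ++ [' '],
       ((PySem.Chars.join [' '] (ws.map String.toList)).foldl pvStepA st).2) := by
  induction ws generalizing st with
  | nil => exact absurd rfl h
  | cons w ws ih =>
    cases ws with
    | nil => simp [PySem.Chars.join, List.intercalate]
    | cons w' ws' =>
      have hj : PySem.Chars.join [' '] ((w :: w' :: ws').map String.toList)
          = w.toList ++ [' '] ++ PySem.Chars.join [' '] ((w' :: ws').map String.toList) := by
        simpa using PySem.Chars.join_cons_cons [' '] w.toList w'.toList (ws'.map String.toList)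
      rw [List.foldl_cons, ih _ (by simp), hj]
      rw [List.foldl_append, List.foldl_append]
      rw [show List.foldl pvStepA (List.foldl pvStepA st w.toList) [' ']
            = ((w.toList.foldl pvStepA st).1 ++ [' '], (w.toList.foldl pvStepA st).2) from
          pvStepA_space _]

theorem pvRstrip_append_space (cs : List Char) :
    PySem.Chars.rstrip (cs ++ [' ']) = PySem.Chars.rstrip cs := by
  simp [PySem.Chars.rstrip, List.dropWhile_cons,
        show PySem.Chars.isspace ' ' = true from rfl]

-- B-side: shift of enumerate
theorem pvEnumerate_shift {α : Type} (xs : List α) (s : Int) :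
    PySem.List.enumerate xs (s + 1) = (PySem.List.enumerate xs s).map (fun p => (p.1 + 1, p.2)) := by
  induction xs generalizing s with
  | nil => simp [PySem.List.enumerate]
  | cons x xs ih => simp [PySem.List.enumerate_cons, ih]

theorem pvPositions_nonneg (cs : List Char) (i : Int)
    (h : i ∈ (PySem.List.enumerate cs).filterMap
      (fun ic => if PySem.Chars.isalpha ic.2 then some ic.1 else none)) : 0 ≤ i := by
  simp only [List.mem_filterMap] at h
  obtain ⟨⟨j, c⟩, hmem, hif⟩ := h
  obtain ⟨k, hk, hp⟩ := (PySem.List.mem_enumerate_iff _ _ _).1 hmem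
  have hji : i = j := by
    by_cases ha : PySem.Chars.isalpha c = true <;> simp [ha] at hif
    omega
  have : j = 0 + (k : Int) := congrArg Prod.fst hp
  omega

-- patching at shifted indices leaves the head cell alone
theorem pvPatch_shift (prs : List (Int × String)) (hd : List Char) (cells : List (List Char))
    (hnn : ∀ p ∈ prs, 0 ≤ p.1) :
    (prs.map (fun p => (p.1 + 1, p.2))).foldl pvPatch (hd :: cells)
      = hd :: prs.foldl pvPatch cells := by
  induction prs generalizing cells with
  | nil => simp
  | cons p prs ih =>
    have h0 : (0:Int) ≤ p.1 := hnn p (by simp)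
    have ht : (p.1 + 1).toNat = p.1.toNat + 1 := by omega
    have hstep : pvPatch (hd :: cells) (p.1 + 1, p.2) = hd :: pvPatch cells p := by
      unfold pvPatch
      simp only [ht, List.set_cons_succ, List.getD_cons_succ]
      split <;> rfl
    simp only [List.map_cons, List.foldl_cons, hstep]
    exact ih _ (fun q hq => hnn q (by simp [hq]))

theorem pvFilterMap_shift (l : List (Int × Char)) :
    (l.map (fun p => (p.1 + 1, p.2))).filterMap
        (fun ic => if PySem.Chars.isalpha ic.2 then some ic.1 else none)
      = (l.filterMap (fun ic => if PySem.Chars.isalpha ic.2 then some ic.1 else none)).map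
          (fun i => i + 1) := by
  induction l with
  | nil => simp
  | cons p l ih =>
    by_cases ha : PySem.Chars.isalpha p.2 = true <;> simp [ha, ih]

theorem pvUpper_not_lower (c : Char) (h : PySem.Chars.isupper c = true) :
    PySem.Chars.islower c = false := by
  simp only [PySem.Chars.isupper, Bool.and_eq_true, decide_eq_true_eq] at h
  have hlt : c < 'a' := lt_of_le_of_lt h.2 (by decide)
  simp [PySem.Chars.islower, not_le.2 hlt]

theorem pvStrIsupper_single (c : Char) (h : PySem.Chars.isalpha c = true) :
    pvStrIsupper [c] = PySem.Chars.isupper c := by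
  unfold pvStrIsupper
  by_cases hu : PySem.Chars.isupper c = true
  · simp [hu, pvUpper_not_lower c hu]
  · simp [hu]

theorem pvPatch_merge (cs : List Char) (ms : List String)
    (h : cs.countP (fun c => PySem.Chars.isalpha c) ≤ ms.length) :
    ((((PySem.List.enumerate cs).filterMap
        (fun ic => if PySem.Chars.isalpha ic.2 then some ic.1 else none)).zip
          (ms.take ((PySem.List.enumerate cs).filterMap
            (fun ic => if PySem.Chars.isalpha ic.2 then some ic.1 else none)).length)).foldl
      pvPatch (cs.map (fun c => [c]))).flatten = pvMerge cs ms := by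
  induction cs generalizing ms with
  | nil => simp [PySem.List.enumerate, pvMerge]
  | cons c cs ih =>
    have hmapid : (Prod.map (fun i : Int => i + 1) (id : String → String))
        = (fun p : Int × String => (p.1 + 1, p.2)) := by
      funext p; cases p; rfl
    have henum : PySem.List.enumerate (c :: cs)
        = ((0 : Int), c) :: (PySem.List.enumerate cs).map (fun p => (p.1 + 1, p.2)) := by
      rw [PySem.List.enumerate_cons]
      have h1 := pvEnumerate_shift cs 0
      norm_num at h1 ⊢
      exact h1
    have hnn : ∀ q ∈ ((PySem.List.enumerate cs).filterMap
        (fun ic => if PySem.Chars.isalpha ic.2 then some ic.1 else none)).zip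
          (ms.take ((PySem.List.enumerate cs).filterMap
            (fun ic => if PySem.Chars.isalpha ic.2 then some ic.1 else none)).length),
        (0 : Int) ≤ q.1 := by
      intro q hq
      exact pvPositions_nonneg cs q.1 (List.of_mem_zip hq).1
    have hnn' : ∀ q ∈ ((PySem.List.enumerate cs).filterMap
        (fun ic => if PySem.Chars.isalpha ic.2 then some ic.1 else none)).zip
          (ms.tail.take ((PySem.List.enumerate cs).filterMap
            (fun ic => if PySem.Chars.isalpha ic.2 then some ic.1 else none)).length),
        (0 : Int) ≤ q.1 := by
      intro q hq
      exact pvPositions_nonneg cs q.1 (List.of_mem_zip hq).1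
    by_cases ha : PySem.Chars.isalpha c = true
    · cases ms with
      | nil => simp [List.countP_cons, ha] at h
      | cons x rest =>
        have h' : cs.countP (fun c => PySem.Chars.isalpha c) ≤ rest.length := by
          simp [List.countP_cons, ha] at h; omega
        rw [henum]
        rw [List.filterMap_cons_some (b := (0:Int)) (by simp [ha])]
        simp only [pvFilterMap_shift]
        simp only [List.length_cons, List.length_map, List.take_succ_cons, List.zip_cons_cons,
          List.foldl_cons, List.map_cons]
        have hstep : pvPatch ([c] :: cs.map (fun c => [c])) ((0 : Int), x)
            = ((if PySem.Chars.isupper c then (PySem.Str.upper x).toList else x.toList)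
                :: cs.map (fun c => [c])) := by
          unfold pvPatch
          by_cases hu : PySem.Chars.isupper c = true <;>
            simp [pvStrIsupper_single c ha, hu]
        rw [hstep, List.zip_map_left, hmapid, pvPatch_shift _ _ _ (by simpa using hnn')]
        simp only [List.flatten_cons]
        rw [ih rest h']
        simp [pvMerge, ha]
    · have haf : PySem.Chars.isalpha c = false := by simpa using ha
      have h' : cs.countP (fun c => PySem.Chars.isalpha c) ≤ ms.length := by
        simpa [List.countP_cons, haf] using h
      rw [henum]
      rw [List.filterMap_cons_none (by simp [haf])]
      simp only [pvFilterMap_shift]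
      simp only [List.length_map, List.map_cons]
      rw [List.zip_map_left, hmapid, pvPatch_shift _ _ _ (by simpa using hnn)]
      simp only [List.flatten_cons]
      rw [ih ms h']
      simp [pvMerge, haf]

-- ===== VERDICT (by name: the statement is the Claim_ definition above) =====
theorem restore_punctuation_to_string_spec : Claim_equal_restore_punctuation_to_string := by
  intro original_string modified_string _ hpre
  unfold Spec_restore_punctuation_to_string
  unfold restore_punctuation_to_string restore_punctuation_to_string_alt
  have hcount : (PySem.Chars.join [' ']
      ((PySem.Str.split₀ original_string).map String.toList)).countP
        (fun c => PySem.Chars.isalpha c) ≤ modified_string.length := by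
    rw [pvCountAlpha_join]; exact hpre
  cases hws : PySem.Str.split₀ original_string with
  | nil =>
    simp [PySem.Chars.join, List.intercalate, PySem.List.enumerate]
  | cons w ws =>
    dsimp only
    rw [pvFold_words (w :: ws) ([], modified_string) (by simp)]
    rw [hws] at hcount
    rw [pvFoldA_merge _ _ _ hcount]
    rw [pvRstrip_append_space]
    rw [pvPatch_merge _ _ hcount]
    simp
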